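-- pv_equiv track=rewrite | github.com/gautamkhanapuri/tasks_api | orm_api/code/apporm.py | mandatory_field_check
-- ===== SOURCE A (Python) =====
-- def mandatory_field_check(data, mandatory_fields):
--     """
--     Checks if the given data has all the mandatory fields of that table. If all mandatory fields are present, returns
--     a dictionary only mandatory columns and their provided values.
--     """
--     valid = {}
--     for field in mandatory_fields:
--         if field in data and data[field]:
--             valid[field] = data[field]
--         else:
--             valid.clear()
--             break
--     return valid
-- ===== SOURCE B (Python) =====
-- def mandatory_field_check(data, mandatory_fields):
--     """Set-based: collect the truthy keys of data once, then a subset test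
--     decides validity; the result dict is built only in the valid case."""
--     truthy = {k for k, v in data.items() if v}
--     if set(mandatory_fields) <= truthy:
--         return {field: data[field] for field in mandatory_fields}
--     return {}
-- ===== Notes on version B (the rewrite author's own statement) =====
-- stated objective: alternative
-- what changed: Replaces A's accumulate-and-clear-on-failure loop over the fields with a set-based check: one pass over data builds the set of truthy keys, a set-subset test decides validity, and only then is the result dict built.
import Mathlib
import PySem

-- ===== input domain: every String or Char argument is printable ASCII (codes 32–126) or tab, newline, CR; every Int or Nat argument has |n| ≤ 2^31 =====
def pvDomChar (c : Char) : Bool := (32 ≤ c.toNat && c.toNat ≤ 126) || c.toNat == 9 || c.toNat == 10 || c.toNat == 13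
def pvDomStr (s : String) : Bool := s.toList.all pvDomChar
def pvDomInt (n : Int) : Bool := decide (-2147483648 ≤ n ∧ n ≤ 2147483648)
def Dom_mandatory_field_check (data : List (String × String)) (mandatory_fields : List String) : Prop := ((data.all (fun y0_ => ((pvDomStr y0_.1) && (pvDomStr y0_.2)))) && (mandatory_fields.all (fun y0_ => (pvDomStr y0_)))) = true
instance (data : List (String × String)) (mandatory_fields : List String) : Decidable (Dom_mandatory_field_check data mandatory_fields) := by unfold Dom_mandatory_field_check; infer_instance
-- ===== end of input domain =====

-- B replaces A's accumulate-and-clear-on-failure loop over the fields with a set-based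
-- validity check (set of truthy data keys, then a subset test) before building the result.

-- ===== PORT A =====
-- A's loop: accumulate into `valid`; on a missing or falsy field, clear and break.
def mfcLoopA (data : PySem.Dict String String) : List String → PySem.Dict String String → PySem.Dict String String
  | [], valid => valid
  | f :: rest, valid =>
    match data.get? f with
    | some v => if v ≠ "" then mfcLoopA data rest (valid.insert f v) else PySem.Dict.empty
    | none => PySem.Dict.empty

def mandatory_field_check (data : List (String × String)) (mandatory_fields : List String) : List (String × String) :=
  (mfcLoopA (PySem.Dict.ofList data) mandatory_fields PySem.Dict.empty).items

-- ===== PORT B =====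
-- truthy = {k for k, v in data.items() if v}; set(mandatory_fields) <= truthy; then the comprehension.
def mandatory_field_check_alt (data : List (String × String)) (mandatory_fields : List String) : List (String × String) :=
  let d := PySem.Dict.ofList data
  let truthy : PySem.Set String := PySem.Set.ofList ((d.items.filter (fun p => p.2 != "")).map Prod.fst)
  if PySem.Set.issubset (PySem.Set.ofList mandatory_fields) truthy then
    (mandatory_fields.foldl (fun acc f => acc.insert f (d.getD f "")) PySem.Dict.empty).items
  else []

-- ===== PRECONDITION & SPEC =====
def Spec_mandatory_field_check (data : List (String × String)) (mandatory_fields : List String) (out : List (String × String)) : Prop := out = mandatory_field_check_alt data mandatory_fields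
instance (data : List (String × String)) (mandatory_fields : List String) (out : List (String × String)) : Decidable (Spec_mandatory_field_check data mandatory_fields out) := by unfold Spec_mandatory_field_check; infer_instance

-- ===== CLAIM (what is proved, stated in full; the proofs are below) =====
def Claim_equal_mandatory_field_check : Prop := ∀ (data : List (String × String)) (mandatory_fields : List String), Dom_mandatory_field_check data mandatory_fields → Spec_mandatory_field_check data mandatory_fields (mandatory_field_check data mandatory_fields)

-- ===== LEMMAS AND PROOFS =====
-- `f in data and data[f]` as a Bool (truthy string = nonempty), used only to state the loop invariant
def mfcOk (d : PySem.Dict String String) (f : String) : Bool :=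
  d.contains f && decide (d.getD f "" ≠ "")

lemma mfcLoopA_eq (d : PySem.Dict String String) (mf : List String) :
    ∀ valid, mfcLoopA d mf valid =
      if mf.all (mfcOk d) then mf.foldl (fun acc f => acc.insert f (d.getD f "")) valid
      else PySem.Dict.empty := by
  induction mf with
  | nil => intro valid; simp [mfcLoopA]
  | cons f rest ih =>
    intro valid
    cases h : d.get? f with
    | none =>
      have hc : d.contains f = false := by
        simp [PySem.Dict.contains_eq_isSome_get?, h]
      simp [mfcLoopA, h, List.all_cons, mfcOk, hc]
    | some v =>
      have hg : d.getD f "" = v := by simp [PySem.Dict.getD, h]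
      have hc : d.contains f = true := by
        simp [PySem.Dict.contains_eq_isSome_get?, h]
      by_cases hv : v = ""
      · simp [mfcLoopA, h, hv, List.all_cons, mfcOk, hc, hg]
      · simp [mfcLoopA, h, hv, List.all_cons, mfcOk, hc, hg, ih]

-- pointwise bridge: `f in data and data[f]` ⟺ f is a truthy key of data
lemma mfcOk_iff_mem_truthy (data : List (String × String)) (f : String) :
    mfcOk (PySem.Dict.ofList data) f = true ↔
      f ∈ (((PySem.Dict.ofList data).items.filter (fun p => p.2 != "")).map Prod.fst) := by
  constructor
  · intro h
    have h' := h
    rw [mfcOk, Bool.and_eq_true] at h'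
    obtain ⟨hc, hv⟩ := h'
    have hs : ((PySem.Dict.ofList data).get? f).isSome = true := by
      rw [← PySem.Dict.contains_eq_isSome_get?]; exact hc
    rcases Option.isSome_iff_exists.mp hs with ⟨v, hget⟩
    have hmem : (f, v) ∈ (PySem.Dict.ofList data).items :=
      PySem.Dict.mem_items_of_get?_eq_some _ hget
    have hgd : (PySem.Dict.ofList data).getD f "" = v :=
      PySem.Dict.getD_of_get?_eq_some _ "" hget
    refine List.mem_map.mpr ⟨(f, v), List.mem_filter.mpr ⟨hmem, ?_⟩, rfl⟩
    have : v ≠ "" := by rw [← hgd]; exact of_decide_eq_true hv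
    simpa using this
  · intro h
    rcases List.mem_map.mp h with ⟨p, hp, hfst⟩
    rcases List.mem_filter.mp hp with ⟨hmem, hne⟩
    obtain ⟨k, v⟩ := p
    cases hfst
    have hget : (PySem.Dict.ofList data).get? k = some v :=
      PySem.Dict.get?_of_mem_items _ hmem (PySem.Dict.nodup_keys_ofList data)
    have hc : (PySem.Dict.ofList data).contains k = true := by
      rw [PySem.Dict.contains_eq_isSome_get?, hget]; rfl
    have hgd : (PySem.Dict.ofList data).getD k "" = v :=
      PySem.Dict.getD_of_get?_eq_some _ "" hget
    have hv : v ≠ "" := by simpa using hne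
    simp [mfcOk, hc, hgd, hv]

-- A's per-field check over the fields equals B's subset test
lemma cond_eq (data : List (String × String)) (mf : List String) :
    mf.all (mfcOk (PySem.Dict.ofList data)) =
      PySem.Set.issubset (PySem.Set.ofList mf)
        (PySem.Set.ofList (((PySem.Dict.ofList data).items.filter (fun p => p.2 != "")).map Prod.fst)) := by
  rw [Bool.eq_iff_iff, List.all_eq_true, PySem.Set.issubset_iff]
  constructor
  · intro h x hx
    have hx' : x ∈ mf := (PySem.Set.mem_ofList _ _).mp hx
    exact (PySem.Set.mem_ofList _ _).mpr ((mfcOk_iff_mem_truthy data x).mp (h x hx'))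
  · intro h x hx
    exact (mfcOk_iff_mem_truthy data x).mpr
      ((PySem.Set.mem_ofList _ _).mp (h x ((PySem.Set.mem_ofList _ _).mpr hx)))

-- ===== VERDICT (by name: the statement is the Claim_ definition above) =====
theorem mandatory_field_check_spec : Claim_equal_mandatory_field_check := by
  intro data mf _
  show _ = _
  unfold mandatory_field_check mandatory_field_check_alt
  rw [mfcLoopA_eq, cond_eq]
  by_cases h : PySem.Set.issubset (PySem.Set.ofList mf)
      (PySem.Set.ofList (((PySem.Dict.ofList data).items.filter (fun p => p.2 != "")).map Prod.fst)) = true <;>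
    simp [h, PySem.Dict.empty]
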